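-- pv_equiv track=rewrite | github.com/nixternal/CodingChallenges | AdventOfCode/2015/09.py | part_one
-- ===== SOURCE A (Python) =====
-- import itertools
--
-- def generate_distance_matrix(locations: list[tuple]) -> list[list[int]]:
--     """
--     Generates a distance matrix from a list of city pair distances.
--
--     The matrix is a 2D list where each element at [i][j] represents the
--     distance between the i-th and j-th city in the list of unique cities.
--
--     Args:
--         locations (list): A list of tuples where each tuple contains two
--                           cities and the distance between them.
--
--     Returns:
--         list: A 2D list (matrix) representing the distances between all cities.
--     """
--
--     # Extract unique cities and sort them
--     cities = sorted({city for c1, c2, _ in locations for city in (c1, c2)})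
--     city_indices = {city: i for i, city in enumerate(cities)}
--     n = len(cities)
--
--     # Initialize the distance matrix with 0s
--     dist_matrix = [[0] * n for _ in range(n)]
--
--     # Populate the matrix with distances
--     for c1, c2, distance in locations:
--         i, j = city_indices[c1], city_indices[c2]
--         dist_matrix[i][j] = dist_matrix[j][i] = distance
--
--     return dist_matrix
--
-- def part_one(data: list) -> float | int:
--     """
--     Solves the first part of the puzzle by calculating the minimum possible
--     travel distance that visits each city exactly once, using brute force
--     (all permutations).
--
--     Args:
--         data (list): A list of city pair distances.
--
--     Returns:
--         int: The minimum travel distance that visits each city exactly once.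
--     """
--
--     distances = generate_distance_matrix(data)
--
--     n = len(distances)
--     cities = range(n)
--
--     min_dist = float("inf")  # Start with a very large number
--
--     # Generate all permutations of cities
--     for perm in itertools.permutations(cities):
--         dist = 0
--         for i in range(n - 1):
--             # Sum the distances for the current permutation
--             dist += distances[perm[i]][perm[i + 1]]
--         if dist < min_dist:  # Update minimum distance if shorter one is found
--             min_dist = dist
--     return min_dist
-- ===== SOURCE B (Python) =====
-- def _best(w, cur, rest, memo):
--     """Minimum cost of a path that starts at cur and visits every city in rest."""
--     key = (cur, rest)
--     if key in memo:
--         return memo[key]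
--     if not rest:
--         best = 0
--     else:
--         best = min(w.get((cur, c), 0) + _best(w, c, rest - {c}, memo) for c in rest)
--     memo[key] = best
--     return best
--
--
-- def part_one(data: list) -> float | int:
--     w = {}
--     for a, b, d in data:
--         w[(a, b)] = w[(b, a)] = d
--     cities = frozenset(c for a, b, _ in data for c in (a, b))
--     if not cities:
--         return 0
--     memo = {}
--     return min(_best(w, c, cities - {c}, memo) for c in cities)
-- ===== Notes on version B (the rewrite author's own statement) =====
-- stated objective: alternative
-- what changed: A brute-forces all n! permutations of the city index matrix; B builds a dictionary of city-pair distances and computes the minimum Hamiltonian path by a memoized recursion on (current city, frozenset of remaining cities) - top-down Held-Karp dynamic programming over subsets (intended as faster, O(2^n n^2) vs O(n! n); a timing run measured 5.12x at n=16 but both exact algorithms time out at n=64, so the speed-up is not confirmed at the largest size).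
import Mathlib
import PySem

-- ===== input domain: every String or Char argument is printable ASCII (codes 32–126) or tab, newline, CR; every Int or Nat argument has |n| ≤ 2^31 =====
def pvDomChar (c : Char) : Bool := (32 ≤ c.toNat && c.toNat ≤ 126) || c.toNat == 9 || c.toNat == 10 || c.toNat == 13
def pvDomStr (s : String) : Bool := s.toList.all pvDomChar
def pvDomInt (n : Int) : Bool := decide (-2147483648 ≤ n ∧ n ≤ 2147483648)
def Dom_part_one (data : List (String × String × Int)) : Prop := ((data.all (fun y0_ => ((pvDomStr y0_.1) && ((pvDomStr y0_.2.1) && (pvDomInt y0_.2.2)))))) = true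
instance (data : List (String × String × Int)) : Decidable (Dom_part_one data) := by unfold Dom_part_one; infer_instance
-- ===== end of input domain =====

-- B replaces A's enumeration of all n! city permutations by a memoized recursion on
-- (current city, remaining set of cities) — top-down Held–Karp dynamic programming
-- (measured 5.12× at n=16 in a timing run; both exact algorithms time out at n=64).

-- ===== PORT A =====
-- A, transliterated: sorted unique cities, a city→index dict, a symmetric distance
-- matrix, then a fold over all permutations of range(n) keeping the running minimum
-- (the float('inf') start is modeled by an Option Int accumulator, none = inf;
-- the final .getD 0 is unreachable because the permutations list is never empty).
def part_one (data : List (String × String × Int)) : Int :=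
  let cities := PySem.List.sorted (PySem.Set.ofList (data.flatMap (fun t => [t.1, t.2.1]))) (fun c => c) false
  let cid : PySem.Dict String Int :=
    (PySem.List.enumerate cities 0).foldl (fun d p => d.insert p.2 p.1) PySem.Dict.empty
  let n := cities.length
  let M0 : List (List Int) := (PySem.List.pyRange 0 (n : Int) 1).map (fun _ => PySem.List.pyRepeat [(0 : Int)] (n : Int))
  let M := data.foldl (fun M t =>
      let i := cid.getD t.1 0
      let j := cid.getD t.2.1 0
      -- dist_matrix[i][j] = distance; then dist_matrix[j][i] = distance
      let M1 := PySem.List.pySetD M i (PySem.List.pySetD (PySem.List.pyGetD M i []) j t.2.2)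
      PySem.List.pySetD M1 j (PySem.List.pySetD (PySem.List.pyGetD M1 j []) i t.2.2)) M0
  let n2 := M.length
  let idxs := PySem.List.pyRange 0 (n2 : Int) 1
  ((PySem.List.permutations idxs idxs.length).foldl (fun md perm =>
      let dist := (PySem.List.pyRange 0 ((n2 : Int) - 1) 1).foldl
        (fun acc i => acc +
          PySem.List.pyGetD (PySem.List.pyGetD M (PySem.List.pyGetD perm i 0) []) (PySem.List.pyGetD perm (i + 1) 0) 0) 0
      match md with
      | none => some dist
      | some m => if dist < m then some dist else some m) none).getD 0

-- ===== PORT B =====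
-- used by bestB's termination proof
theorem discard_length_lt {s : List String} {c : String} (h : c ∈ s) :
    (PySem.Set.discard s c).length < s.length := by
  simp only [PySem.Set.discard]
  exact List.length_filter_lt_length_iff_exists.mpr ⟨c, h, by simp⟩

-- _best of Source B: memoized minimum path cost starting at cur through all of rest.
-- The Python memo key is (cur, frozenset(rest)); the frozenset is modeled by the
-- sorted list of rest's (distinct) elements, which is canonical for set equality.
def bestB (w : PySem.Dict (String × String) Int) (cur : String) (rest : List String)
    (memo : PySem.Dict (String × List String) Int) : Int × PySem.Dict (String × List String) Int :=
  let key := (cur, PySem.List.sorted rest (fun c => c) false)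
  match memo.get? key with
  | some v => (v, memo)
  | none =>
    let r :=
      if rest.isEmpty then ((0 : Int), memo)
      else
        -- min(w.get((cur, c), 0) + _best(w, c, rest - {c}, memo) for c in rest)
        let p := rest.attach.foldl
          (fun (p : Option Int × PySem.Dict (String × List String) Int) c =>
            let r := bestB w c.1 (PySem.Set.discard rest c.1) p.2
            let x := w.getD (cur, c.1) 0 + r.1
            (match p.1 with
             | none => some x
             | some m => if x < m then some x else some m, r.2))
          (none, memo)
        (p.1.getD 0, p.2)
    (r.1, r.2.insert key r.1)
termination_by rest.length
decreasing_by exact discard_length_lt c.2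

def part_one_alt (data : List (String × String × Int)) : Int :=
  let w := data.foldl (fun w t => (PySem.Dict.insert w (t.1, t.2.1) t.2.2).insert (t.2.1, t.1) t.2.2) PySem.Dict.empty
  let cities : PySem.Set String := PySem.Set.ofList (data.flatMap (fun t => [t.1, t.2.1]))
  if cities.isEmpty then 0
  else
    -- min(_best(w, c, cities - {c}, memo) for c in cities), the memo threaded through
    ((cities.attach.foldl
        (fun (p : Option Int × PySem.Dict (String × List String) Int) c =>
          let r := bestB w c.1 (PySem.Set.discard cities c.1) p.2
          (match p.1 with
           | none => some r.1
           | some m => if r.1 < m then some r.1 else some m, r.2))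
        (none, PySem.Dict.empty)).1).getD 0

-- ===== PRECONDITION & SPEC =====
def Spec_part_one (data : List (String × String × Int)) (out : Int) : Prop := out = part_one_alt data
instance (data : List (String × String × Int)) (out : Int) : Decidable (Spec_part_one data out) := by unfold Spec_part_one; infer_instance

-- ===== CLAIM (what is proved, stated in full; the proofs are below) =====
def Claim_equal_part_one : Prop := ∀ (data : List (String × String × Int)), Dom_part_one data → Spec_part_one data (part_one data)

-- ===== LEMMAS AND PROOFS =====

-- ---- generic running-minimum machinery ----

-- one step of Python's min-accumulation pattern (`if x < m: m = x`), none = not started yet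
def minStep (md : Option Int) (x : Int) : Option Int :=
  match md with
  | none => some x
  | some m => if x < m then some x else some m

def runMin (l : List Int) : Option Int := l.foldl minStep none

def IsMinOf (m : Int) (l : List Int) : Prop := m ∈ l ∧ ∀ x ∈ l, m ≤ x

theorem runMin_go (t : List Int) (m : Int) :
    t.foldl minStep (some m) = some (t.foldl min m) := by
  induction t generalizing m with
  | nil => rfl
  | cons x t ih =>
    have h : minStep (some m) x = some (min m x) := by
      show (if x < m then some x else some m) = some (min m x)
      rcases lt_or_ge x m with hx | hx
      · rw [if_pos hx, min_eq_right hx.le]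
      · rw [if_neg (not_lt.mpr hx), min_eq_left hx]
    simp only [List.foldl_cons, h, ih]

theorem runMin_cons (x : Int) (t : List Int) : runMin (x :: t) = some (t.foldl min x) := by
  simp only [runMin, List.foldl_cons]
  exact runMin_go t x

theorem runMin_isMin {l : List Int} {m : Int} (h : runMin l = some m) : IsMinOf m l := by
  cases l with
  | nil => simp [runMin] at h
  | cons x t =>
    rw [runMin_cons] at h
    obtain rfl : t.foldl min x = m := by injection h
    constructor
    · rcases PySem.List.foldl_min_mem t x with h' | h'
      · rw [h']; exact List.mem_cons_self
      · exact List.mem_cons_of_mem _ h'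
    · intro y hy
      rcases List.mem_cons.mp hy with rfl | hy
      · exact (PySem.List.foldl_min_le t y).1
      · exact (PySem.List.foldl_min_le t x).2 y hy

theorem IsMinOf_unique {l : List Int} {m₁ m₂ : Int} (h₁ : IsMinOf m₁ l) (h₂ : IsMinOf m₂ l) :
    m₁ = m₂ :=
  le_antisymm (h₁.2 _ h₂.1) (h₂.2 _ h₁.1)

theorem IsMinOf_of_mem_iff {l₁ l₂ : List Int} {m : Int} (h : ∀ x, x ∈ l₁ ↔ x ∈ l₂)
    (hm : IsMinOf m l₁) : IsMinOf m l₂ :=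
  ⟨(h _).mp hm.1, fun x hx => hm.2 x ((h x).mpr hx)⟩

-- ---- permutations: membership is exactly being a permutation of the input ----

theorem permutations_succ {α : Type} (xs : List α) (r : Nat) :
    PySem.List.permutations xs (r + 1) =
      (List.range xs.length).flatMap (fun i =>
        match xs[i]? with
        | none => []
        | some x => (PySem.List.permutations (xs.eraseIdx i) r).map (x :: ·)) := by
  rw [PySem.List.permutations]; rfl

theorem mem_permutations_of_perm {α : Type} [DecidableEq α] :
    ∀ (n : Nat) (xs q : List α), xs.length = n → q.Perm xs →
      q ∈ PySem.List.permutations xs n := by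
  intro n
  induction n with
  | zero =>
    intro xs q hlen hq
    obtain rfl : xs = [] := List.length_eq_zero_iff.mp hlen
    obtain rfl : q = [] := hq.eq_nil
    simp [PySem.List.permutations]
  | succ n ih =>
    intro xs q hlen hq
    cases q with
    | nil => simpa [hlen] using hq.length_eq
    | cons c q' =>
      obtain ⟨hc, hq'⟩ := List.cons_perm_iff_perm_erase.mp hq
      have hi : xs.idxOf c < xs.length := List.idxOf_lt_length_of_mem hc
      have hget : xs[xs.idxOf c]? = some c := by
        rw [List.getElem?_eq_getElem hi, List.getElem_idxOf]
      have herase : xs.eraseIdx (xs.idxOf c) = xs.erase c :=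
        List.eraseIdx_idxOf_eq_erase c xs
      have hlen' : (xs.eraseIdx (xs.idxOf c)).length = n := by
        rw [List.length_eraseIdx_of_lt hi]; omega
      refine (permutations_succ xs n) ▸ List.mem_flatMap.mpr ⟨xs.idxOf c, List.mem_range.mpr hi, ?_⟩
      rw [hget]
      exact List.mem_map.mpr ⟨q', ih _ _ hlen' (herase ▸ hq'), rfl⟩

def adjSum {α : Type} (F : α → α → Int) : List α → Int
  | a :: b :: t => F a b + adjSum F (b :: t)
  | _ => 0
@[simp] theorem adjSum_cons_cons {α : Type} (F : α → α → Int) (a b : α) (t : List α) :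
    adjSum F (a :: b :: t) = F a b + adjSum F (b :: t) := rfl
theorem adjSum_map {α β : Type} (F : β → β → Int) (h : α → β) :
    ∀ (l : List α), adjSum F (l.map h) = adjSum (fun a b => F (h a) (h b)) l := by
  intro l
  induction l with
  | nil => rfl
  | cons a t ih =>
    cases t with
    | nil => rfl
    | cons b t' => simp only [List.map_cons, adjSum_cons_cons, ← ih, List.map_cons]

theorem adjSum_congr {α : Type} {F G : α → α → Int} :
    ∀ {l : List α}, (∀ a ∈ l, ∀ b ∈ l, F a b = G a b) → adjSum F l = adjSum G l := by
  intro l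
  induction l with
  | nil => intro; rfl
  | cons a t ih =>
    intro h
    cases t with
    | nil => rfl
    | cons b t' =>
      have h1 : F a b = G a b := h a (by simp) b (by simp)
      have h2 : adjSum F (b :: t') = adjSum G (b :: t') :=
        ih (fun x hx y hy => h x (List.mem_cons_of_mem _ hx) y (List.mem_cons_of_mem _ hy))
      simp only [adjSum_cons_cons, h1, h2]

theorem adjSum_eq_zip_sum {α : Type} (F : α → α → Int) :
    ∀ (l : List α), adjSum F l = ((l.zip l.tail).map (fun p => F p.1 p.2)).sum := by
  intro l
  induction l with
  | nil => rfl
  | cons a t ih =>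
    cases t with
    | nil => rfl
    | cons b t' => simp only [adjSum_cons_cons, ih, List.tail_cons, List.zip_cons_cons, List.map_cons, List.sum_cons]

def mget (M : List (List Int)) (i j : Int) : Int :=
  PySem.List.pyGetD (PySem.List.pyGetD M i []) j 0

theorem range_pairs_map (p : List Int) (F : Int → Int → Int) :
    (PySem.List.pyRange 0 ((p.length : Int) - 1) 1).map
        (fun i => F (PySem.List.pyGetD p i 0) (PySem.List.pyGetD p (i + 1) 0))
      = (p.zip p.tail).map (fun x => F x.1 x.2) := by
  apply List.ext_getElem
  · simp [PySem.List.length_pyRange_one, List.length_zip]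
  · intro k h1 h2
    have hk : k < p.length - 1 := by
      simpa [PySem.List.length_pyRange_one] using (by simpa using h1 : k < ((p.length : Int) - 1 - 0).toNat)
    rw [List.getElem_map, List.getElem_map, PySem.List.getElem_pyRange_one]
    have e1 : (0 : Int) + (k : Nat) = ((k : Nat) : Int) := by omega
    have e2 : ((k : Nat) : Int) + 1 = (((k + 1 : Nat)) : Int) := by push_cast; ring
    rw [e1, e2, PySem.List.pyGetD_natCast, PySem.List.pyGetD_natCast]
    rw [List.getElem_zip, List.getElem_tail]
    rw [List.getD_eq_getElem p 0 (by omega), List.getD_eq_getElem p 0 (by omega)]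

theorem ipath_eq_adjSum (M : List (List Int)) (p : List Int) :
    (PySem.List.pyRange 0 ((p.length : Int) - 1) 1).foldl
      (fun acc i => acc +
        PySem.List.pyGetD (PySem.List.pyGetD M (PySem.List.pyGetD p i 0) []) (PySem.List.pyGetD p (i + 1) 0) 0) 0
    = adjSum (mget M) p := by
  rw [PySem.List.foldl_add, adjSum_eq_zip_sum, ← range_pairs_map p (mget M)]
  simp only [mget, zero_add]

theorem mem_permutations_iff {α : Type} [DecidableEq α] {xs q : List α} :
    q ∈ PySem.List.permutations xs xs.length ↔ q.Perm xs :=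
  ⟨PySem.List.perm_of_mem_permutations, mem_permutations_of_perm xs.length xs q rfl⟩

theorem perms_map_mem_iff {rest rest' : List String} (h : rest.Perm rest') (F : List String → Int) :
    ∀ x, x ∈ (PySem.List.permutations rest rest.length).map F ↔
          x ∈ (PySem.List.permutations rest' rest'.length).map F := by
  intro x
  simp only [List.mem_map, mem_permutations_iff]
  constructor
  · rintro ⟨q, hq, rfl⟩; exact ⟨q, hq.trans h, rfl⟩
  · rintro ⟨q, hq, rfl⟩; exact ⟨q, hq.trans h.symm, rfl⟩

-- ---- the city→index dictionary of A ----

theorem cid_getD :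
    ∀ {l : List String}, l.Nodup → ∀ {c : String}, c ∈ l →
    ((PySem.List.enumerate l 0).foldl (fun d p => d.insert p.2 p.1) PySem.Dict.empty).getD c 0
      = (l.idxOf c : Int) := by
  intro l
  induction l using List.reverseRecOn with
  | nil => intro _ c hc; simp at hc
  | append_singleton l x ih =>
    intro hnd c hc
    have hx : x ∉ l := by
      intro hmem
      exact (by simpa using (List.nodup_append.mp hnd).2.2 : ∀ a ∈ l, ¬a = x) x hmem rfl
    rw [PySem.List.enumerate_append, List.foldl_append]
    simp only [PySem.List.enumerate_cons, PySem.List.enumerate_nil, List.foldl_cons, List.foldl_nil]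
    rw [PySem.Dict.getD_insert]
    by_cases hcx : c = x
    · subst hcx
      rw [if_pos rfl]
      rw [List.idxOf_append_of_notMem hx]
      simp
    · rw [if_neg hcx]
      have hcl : c ∈ l := by
        rcases List.mem_append.mp hc with h | h
        · exact h
        · simp at h; exact absurd h hcx
      rw [ih (List.nodup_append.mp hnd).1 hcl, List.idxOf_append_of_mem hcl]

-- ---- the distance matrix of A agrees with the pair dictionary of B ----

theorem mset1 {M : List (List Int)} {n : Nat} (hlen : M.length = n) (hrows : ∀ r ∈ M, r.length = n)
    {i j : Int} (hi : 0 ≤ i) (hi' : i < (n : Int)) (hj : 0 ≤ j) (hj' : j < (n : Int)) (v : Int) :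
    (PySem.List.pySetD M i (PySem.List.pySetD (PySem.List.pyGetD M i []) j v)).length = n ∧
    (∀ r ∈ PySem.List.pySetD M i (PySem.List.pySetD (PySem.List.pyGetD M i []) j v), r.length = n) ∧
    (∀ a b : Int, 0 ≤ a → a < (n : Int) → 0 ≤ b → b < (n : Int) →
      mget (PySem.List.pySetD M i (PySem.List.pySetD (PySem.List.pyGetD M i []) j v)) a b
        = if a = i ∧ b = j then v else mget M a b) := by
  have hiN : i.toNat < M.length := by omega
  have hrow : PySem.List.pyGetD M i [] = M[i.toNat] := PySem.List.pyGetD_eq_getElem _ _ hi (by omega)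
  have hrlen : M[i.toNat].length = n := hrows _ (List.getElem_mem hiN)
  have hjN : j.toNat < M[i.toNat].length := by omega
  have hset : PySem.List.pySetD M i (PySem.List.pySetD (PySem.List.pyGetD M i []) j v)
      = M.set i.toNat (M[i.toNat].set j.toNat v) := by
    rw [hrow]; simp [PySem.List.pySetD_of_nonneg, hi, hj]
  rw [hset]
  refine ⟨by simp [hlen], ?_, ?_⟩
  · intro r hr
    rcases List.mem_or_eq_of_mem_set hr with h | h
    · exact hrows r h
    · subst h; simp [hrlen]
  · intro a b ha ha' hb hb'
    have haN : a.toNat < M.length := by omega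
    have hsetlen : (M.set i.toNat (M[i.toNat].set j.toNat v)).length = M.length := by simp
    have h1 : PySem.List.pyGetD (M.set i.toNat (M[i.toNat].set j.toNat v)) a []
        = (M.set i.toNat (M[i.toNat].set j.toNat v))[a.toNat]'(by omega) :=
      PySem.List.pyGetD_eq_getElem _ _ ha (by omega)
    by_cases hai : a = i
    · subst hai
      rw [mget, h1, List.getElem_set_self (by simp; omega)]
      by_cases hbj : b = j
      · subst hbj
        rw [PySem.List.pyGetD_eq_getElem _ _ hb (by simp [hrlen]; omega), List.getElem_set_self (by simp [hrlen]; omega)]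
        simp
      · have hbjN : b.toNat ≠ j.toNat := by omega
        rw [PySem.List.pyGetD_eq_getElem _ _ hb (by simp [hrlen]; omega), List.getElem_set_ne (fun h => hbjN h.symm)]
        rw [if_neg (by tauto), mget, hrow]
        rw [PySem.List.pyGetD_eq_getElem _ _ hb (by omega)]
    · have haiN : a.toNat ≠ i.toNat := by omega
      rw [mget, h1, List.getElem_set_ne (fun h => haiN h.symm)]
      rw [if_neg (by tauto), mget]
      rw [PySem.List.pyGetD_eq_getElem _ _ ha (by omega)]

def Wd (w : PySem.Dict (String × String) Int) (a b : String) : Int := w.getD (a, b) 0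

theorem idxOf_inj_on {S : List String} {a b : String} (ha : a ∈ S) (hb : b ∈ S)
    (h : S.idxOf a = S.idxOf b) : a = b := by
  have h1 : S[S.idxOf a]'(List.idxOf_lt_length_of_mem ha) = a :=
    List.getElem_idxOf (List.idxOf_lt_length_of_mem ha)
  have h2 : S[S.idxOf b]'(List.idxOf_lt_length_of_mem hb) = b :=
    List.getElem_idxOf (List.idxOf_lt_length_of_mem hb)
  simp only [h] at h1
  exact h1.symm.trans h2

theorem matrix_dict_inv (S : List String)
    (cid : PySem.Dict String Int) (hcid : ∀ c ∈ S, cid.getD c 0 = (S.idxOf c : Int)) :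
    ∀ (d : List (String × String × Int)), (∀ t ∈ d, t.1 ∈ S ∧ t.2.1 ∈ S) →
    ∀ (M : List (List Int)) (w : PySem.Dict (String × String) Int),
      M.length = S.length → (∀ r ∈ M, r.length = S.length) →
      (∀ a ∈ S, ∀ b ∈ S, mget M (S.idxOf a) (S.idxOf b) = Wd w a b) →
      (d.foldl (fun M t =>
          let i := cid.getD t.1 0
          let j := cid.getD t.2.1 0
          let M1 := PySem.List.pySetD M i (PySem.List.pySetD (PySem.List.pyGetD M i []) j t.2.2)
          PySem.List.pySetD M1 j (PySem.List.pySetD (PySem.List.pyGetD M1 j []) i t.2.2)) M).length = S.length ∧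
      (∀ r ∈ (d.foldl (fun M t =>
          let i := cid.getD t.1 0
          let j := cid.getD t.2.1 0
          let M1 := PySem.List.pySetD M i (PySem.List.pySetD (PySem.List.pyGetD M i []) j t.2.2)
          PySem.List.pySetD M1 j (PySem.List.pySetD (PySem.List.pyGetD M1 j []) i t.2.2)) M), r.length = S.length) ∧
      (∀ a ∈ S, ∀ b ∈ S,
        mget (d.foldl (fun M t =>
          let i := cid.getD t.1 0
          let j := cid.getD t.2.1 0
          let M1 := PySem.List.pySetD M i (PySem.List.pySetD (PySem.List.pyGetD M i []) j t.2.2)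
          PySem.List.pySetD M1 j (PySem.List.pySetD (PySem.List.pyGetD M1 j []) i t.2.2)) M) (S.idxOf a) (S.idxOf b)
          = Wd (d.foldl (fun w t => (PySem.Dict.insert w (t.1, t.2.1) t.2.2).insert (t.2.1, t.1) t.2.2) w) a b) := by
  intro d
  induction d with
  | nil => intro _ M w h1 h2 h3; exact ⟨h1, h2, h3⟩
  | cons t d ih =>
    intro hd M w h1 h2 h3
    obtain ⟨hc1, hc2⟩ := hd t (List.mem_cons_self)
    have hi1 : S.idxOf t.1 < S.length := List.idxOf_lt_length_of_mem hc1
    have hi2 : S.idxOf t.2.1 < S.length := List.idxOf_lt_length_of_mem hc2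
    simp only [List.foldl_cons, hcid t.1 hc1, hcid t.2.1 hc2]
    obtain ⟨g1, g2, g3⟩ := mset1 h1 h2 (i := (S.idxOf t.1 : Int)) (j := (S.idxOf t.2.1 : Int))
      (by positivity) (by exact_mod_cast hi1) (by positivity) (by exact_mod_cast hi2) t.2.2
    obtain ⟨k1, k2, k3⟩ := mset1 g1 g2 (i := (S.idxOf t.2.1 : Int)) (j := (S.idxOf t.1 : Int))
      (by positivity) (by exact_mod_cast hi2) (by positivity) (by exact_mod_cast hi1) t.2.2
    refine ih (fun u hu => hd u (List.mem_cons_of_mem _ hu)) _ _ k1 k2 ?_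
    intro a ha b hb
    have hia : S.idxOf a < S.length := List.idxOf_lt_length_of_mem ha
    have hib : S.idxOf b < S.length := List.idxOf_lt_length_of_mem hb
    rw [k3 _ _ (by positivity) (by exact_mod_cast hia) (by positivity) (by exact_mod_cast hib)]
    rw [g3 _ _ (by positivity) (by exact_mod_cast hia) (by positivity) (by exact_mod_cast hib)]
    have ecast : ∀ x y : String, x ∈ S → y ∈ S → (((S.idxOf x : Nat) : Int) = ((S.idxOf y : Nat) : Int) ↔ x = y) := by
      intro x y hx hy
      constructor
      · intro h; exact idxOf_inj_on hx hy (by exact_mod_cast h)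
      · intro h; rw [h]
    have c1 := and_congr (ecast a t.2.1 ha hc2) (ecast b t.1 hb hc1)
    have c2 := and_congr (ecast a t.1 ha hc1) (ecast b t.2.1 hb hc2)
    have d1 : ((a, b) = (t.2.1, t.1)) ↔ (a = t.2.1 ∧ b = t.1) := by rw [Prod.mk.injEq]
    have d2 : ((a, b) = (t.1, t.2.1)) ↔ (a = t.1 ∧ b = t.2.1) := by rw [Prod.mk.injEq]
    simp only [Wd, PySem.Dict.getD_insert]
    rw [if_congr c1 rfl rfl, if_congr c2 rfl rfl, if_congr d1 rfl rfl, if_congr d2 rfl rfl]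
    by_cases e1 : a = t.2.1 ∧ b = t.1
    · rw [if_pos e1, if_pos e1]
    · rw [if_neg e1, if_neg e1]
      by_cases e2 : a = t.1 ∧ b = t.2.1
      · rw [if_pos e2, if_pos e2]
      · rw [if_neg e2, if_neg e2]
        exact h3 a ha b hb

-- ---- B, un-memoized reference form, computes the minimal path cost ----

theorem cons_discard_perm {rest : List String} (hnd : rest.Nodup) {c : String} (hc : c ∈ rest) :
    (c :: PySem.Set.discard rest c).Perm rest := by
  have hnd' : (c :: PySem.Set.discard rest c).Nodup := by
    refine List.nodup_cons.mpr ⟨?_, PySem.Set.nodup_discard _ _ hnd⟩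
    intro h
    exact (((PySem.Set.mem_discard _ _ _).mp h).2 rfl)
  refine (List.perm_ext_iff_of_nodup hnd' hnd).mpr ?_
  intro x
  simp only [List.mem_cons, PySem.Set.mem_discard]
  constructor
  · rintro (rfl | ⟨h, _⟩) <;> assumption
  · intro hx
    by_cases hxc : x = c
    · exact Or.inl hxc
    · exact Or.inr ⟨hx, hxc⟩

theorem erase_perm_discard {rest : List String} (hnd : rest.Nodup) (c : String) :
    (rest.erase c).Perm (PySem.Set.discard rest c) := by
  refine (List.perm_ext_iff_of_nodup (hnd.erase c) (PySem.Set.nodup_discard _ _ hnd)).mpr ?_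
  intro x
  rw [hnd.mem_erase_iff, PySem.Set.mem_discard]
  tauto

def bestP (w : PySem.Dict (String × String) Int) (cur : String) (rest : List String) : Int :=
  if rest.isEmpty then 0
  else (runMin (rest.attach.map
    (fun c => w.getD (cur, c.1) 0 + bestP w c.1 (PySem.Set.discard rest c.1)))).getD 0
termination_by rest.length
decreasing_by exact discard_length_lt c.2

-- new material

theorem bestP_isMin_aux (w : PySem.Dict (String × String) Int) :
    ∀ (n : Nat) (rest : List String), rest.length ≤ n → rest.Nodup → ∀ (cur : String),
      IsMinOf (bestP w cur rest)
        ((PySem.List.permutations rest rest.length).map (fun q => adjSum (Wd w) (cur :: q))) := by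
  intro n
  induction n with
  | zero =>
    intro rest hlen hnd cur
    obtain rfl : rest = [] := List.length_eq_zero_iff.mp (by omega)
    rw [bestP]
    simp [IsMinOf, adjSum]
  | succ n ih =>
    intro rest hlen hnd cur
    cases hrest : rest with
    | nil =>
      subst hrest
      rw [bestP]
      simp [IsMinOf, adjSum]
    | cons rx rt =>
      subst hrest
      set R := rx :: rt with hR
      have hne : (R.attach.map
          (fun c => w.getD (cur, c.1) 0 + bestP w c.1 (PySem.Set.discard R c.1))) ≠ [] := by
        simp [hR]
      obtain ⟨v, V, hV⟩ := List.exists_cons_of_ne_nil hne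
      rw [bestP, if_neg (by simp [hR]), hV, runMin_cons, Option.getD_some]
      have hmin : IsMinOf (V.foldl min v) (R.attach.map
          (fun c => w.getD (cur, c.1) 0 + bestP w c.1 (PySem.Set.discard R c.1))) := by
        rw [hV]; exact runMin_isMin (runMin_cons v V)
      constructor
      · -- the minimum is the cost of some full path
        obtain ⟨c, -, hc⟩ := List.mem_map.mp hmin.1
        have hcR : c.1 ∈ R := c.2
        have hsub := ih (PySem.Set.discard R c.1)
          (by have := discard_length_lt hcR; omega)
          (PySem.Set.nodup_discard _ _ hnd) c.1
        obtain ⟨q', hq'mem, hq'⟩ := List.mem_map.mp hsub.1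
        have hq'p : q'.Perm (PySem.Set.discard R c.1) := mem_permutations_iff.mp hq'mem
        have hqR : (c.1 :: q').Perm R := (hq'p.cons c.1).trans (cons_discard_perm hnd hcR)
        refine List.mem_map.mpr ⟨c.1 :: q', mem_permutations_iff.mpr hqR, ?_⟩
        rw [adjSum_cons_cons, hq', ← hc]
        rfl
      · -- it is a lower bound on every full path cost
        intro x hx
        obtain ⟨q, hqmem, rfl⟩ := List.mem_map.mp hx
        have hq : q.Perm R := mem_permutations_iff.mp hqmem
        cases q with
        | nil => simpa [hR] using hq.length_eq
        | cons c q' =>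
          obtain ⟨hc, hq'⟩ := List.cons_perm_iff_perm_erase.mp hq
          have hq'd : q'.Perm (PySem.Set.discard R c) := hq'.trans (erase_perm_discard hnd c)
          have hsub := ih (PySem.Set.discard R c)
            (by have := discard_length_lt hc; omega)
            (PySem.Set.nodup_discard _ _ hnd) c
          have hb1 : bestP w c (PySem.Set.discard R c) ≤ adjSum (Wd w) (c :: q') :=
            hsub.2 _ (List.mem_map.mpr ⟨q', mem_permutations_iff.mpr hq'd, rfl⟩)
          have hb2 : V.foldl min v ≤ w.getD (cur, c) 0 + bestP w c (PySem.Set.discard R c) :=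
            hmin.2 _ (List.mem_map.mpr ⟨⟨c, hc⟩, List.mem_attach _ _, rfl⟩)
          rw [adjSum_cons_cons]
          have : Wd w cur c = w.getD (cur, c) 0 := rfl
          omega

theorem bestP_isMin (w : PySem.Dict (String × String) Int) (rest : List String) (hnd : rest.Nodup)
    (cur : String) :
    IsMinOf (bestP w cur rest)
      ((PySem.List.permutations rest rest.length).map (fun q => adjSum (Wd w) (cur :: q))) :=
  bestP_isMin_aux w rest.length rest le_rfl hnd cur

theorem bestP_congr_perm {w : PySem.Dict (String × String) Int} {cur : String}
    {rest rest' : List String} (h : rest.Perm rest') (hnd : rest.Nodup) (hnd' : rest'.Nodup) :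
    bestP w cur rest = bestP w cur rest' :=
  IsMinOf_unique (bestP_isMin w rest hnd cur)
    (IsMinOf_of_mem_iff (fun x => (perms_map_mem_iff h _ x).symm) (bestP_isMin w rest' hnd' cur))

-- ---- the memoized recursion computes the reference value ----

def SoundM (w : PySem.Dict (String × String) Int) (memo : PySem.Dict (String × List String) Int) : Prop :=
  ∀ c s v, memo.get? (c, s) = some v → s.Nodup ∧ v = bestP w c s

theorem sorted_id_perm (rest : List String) : (PySem.List.sorted rest (fun c => c) false).Perm rest :=
  PySem.List.sorted_perm rest _ false

theorem bestP_nil (w : PySem.Dict (String × String) Int) (cur : String) : bestP w cur [] = 0 := by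
  rw [bestP]; rfl

theorem sorted_nil : PySem.List.sorted ([] : List String) (fun c => c) false = [] := rfl

theorem insert_sound {w : PySem.Dict (String × String) Int}
    {memo : PySem.Dict (String × List String) Int} (hS : SoundM w memo)
    {cur : String} {R : List String} (hnd : R.Nodup) {val : Int} (hval : val = bestP w cur R) :
    SoundM w (memo.insert (cur, PySem.List.sorted R (fun c => c) false) val) := by
  intro c s v hv
  rw [PySem.Dict.get?_insert] at hv
  by_cases hk : (c, s) = (cur, PySem.List.sorted R (fun c => c) false)
  · rw [if_pos hk] at hv
    obtain ⟨h1, h2⟩ := Prod.mk.injEq .. ▸ hk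
    subst h1; subst h2
    obtain rfl : val = v := by injection hv
    have hsnd : (PySem.List.sorted R (fun c => c) false).Nodup := ((sorted_id_perm R).nodup_iff).mpr hnd
    exact ⟨hsnd, by rw [hval]; exact bestP_congr_perm (sorted_id_perm R).symm hnd hsnd⟩
  · rw [if_neg hk] at hv
    exact hS c s v hv

theorem bestB_spec_aux (w : PySem.Dict (String × String) Int) :
    ∀ (n : Nat) (rest : List String), rest.length ≤ n → rest.Nodup →
    ∀ (cur : String) (memo : PySem.Dict (String × List String) Int), SoundM w memo →
      (bestB w cur rest memo).1 = bestP w cur rest ∧ SoundM w (bestB w cur rest memo).2 := by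
  intro n
  induction n with
  | zero =>
    intro rest hlen hnd cur memo hS
    obtain rfl : rest = [] := List.length_eq_zero_iff.mp (by omega)
    rw [bestB]
    cases h : memo.get? (cur, PySem.List.sorted [] (fun c => c) false) with
    | some v =>
      exact ⟨by rw [bestP_nil]; exact ((hS _ _ _ h).2.trans (by rw [sorted_nil, bestP_nil])), hS⟩
    | none =>
      refine ⟨by rw [bestP_nil]; rfl, ?_⟩
      show SoundM w (memo.insert (cur, PySem.List.sorted [] (fun c => c) false) 0)
      exact insert_sound hS List.nodup_nil (by rw [bestP_nil])
  | succ n ih =>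
    intro rest hlen hnd cur memo hS
    rw [bestB]
    cases h : memo.get? (cur, PySem.List.sorted rest (fun c => c) false) with
    | some v =>
      obtain ⟨hsnd, hv⟩ := hS _ _ _ h
      exact ⟨hv.trans (bestP_congr_perm (sorted_id_perm rest) hsnd hnd), hS⟩
    | none =>
      cases hrest : rest with
      | nil =>
        subst hrest
        refine ⟨by rw [bestP_nil]; rfl, ?_⟩
        show SoundM w (memo.insert (cur, PySem.List.sorted [] (fun c => c) false) 0)
        exact insert_sound hS List.nodup_nil (by rw [bestP_nil])
      | cons rx rt =>
        subst hrest
        set R := rx :: rt with hR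
        have hfold : ∀ (l : List {x // x ∈ R}) (acc : Option Int)
            (memo₀ : PySem.Dict (String × List String) Int), SoundM w memo₀ →
            (l.foldl
              (fun (p : Option Int × PySem.Dict (String × List String) Int) c =>
                let r := bestB w c.1 (PySem.Set.discard R c.1) p.2
                let x := w.getD (cur, c.1) 0 + r.1
                (match p.1 with
                 | none => some x
                 | some m => if x < m then some x else some m, r.2))
              (acc, memo₀)).1
              = l.foldl (fun a c =>
                  minStep a (w.getD (cur, c.1) 0 + bestP w c.1 (PySem.Set.discard R c.1))) acc ∧
            SoundM w (l.foldl
              (fun (p : Option Int × PySem.Dict (String × List String) Int) c =>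
                let r := bestB w c.1 (PySem.Set.discard R c.1) p.2
                let x := w.getD (cur, c.1) 0 + r.1
                (match p.1 with
                 | none => some x
                 | some m => if x < m then some x else some m, r.2))
              (acc, memo₀)).2 := by
          intro l
          induction l with
          | nil => intro acc memo₀ hS₀; exact ⟨rfl, hS₀⟩
          | cons c l ihl =>
            intro acc memo₀ hS₀
            have hrec := ih (PySem.Set.discard R c.1)
              (by have := discard_length_lt c.2; omega)
              (PySem.Set.nodup_discard _ _ hnd) c.1 memo₀ hS₀
            simp only [List.foldl_cons]
            have hstep :
                ((match acc with
                 | none => some (w.getD (cur, c.1) 0 + (bestB w c.1 (PySem.Set.discard R c.1) memo₀).1)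
                 | some m => if w.getD (cur, c.1) 0 + (bestB w c.1 (PySem.Set.discard R c.1) memo₀).1 < m
                     then some (w.getD (cur, c.1) 0 + (bestB w c.1 (PySem.Set.discard R c.1) memo₀).1)
                     else some m : Option Int),
                 (bestB w c.1 (PySem.Set.discard R c.1) memo₀).2)
                = (minStep acc (w.getD (cur, c.1) 0 + bestP w c.1 (PySem.Set.discard R c.1)),
                   (bestB w c.1 (PySem.Set.discard R c.1) memo₀).2) := by
              rw [hrec.1]
              cases acc <;> rfl
            rw [hstep]
            exact ihl _ _ hrec.2
        have hmain := hfold R.attach none memo hS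
        have hbP : bestP w cur R = (runMin (R.attach.map
            (fun c => w.getD (cur, c.1) 0 + bestP w c.1 (PySem.Set.discard R c.1)))).getD 0 := by
          rw [bestP, if_neg (by simp [hR])]
        have hval : (R.attach.foldl
              (fun (p : Option Int × PySem.Dict (String × List String) Int) c =>
                let r := bestB w c.1 (PySem.Set.discard R c.1) p.2
                let x := w.getD (cur, c.1) 0 + r.1
                (match p.1 with
                 | none => some x
                 | some m => if x < m then some x else some m, r.2))
              (none, memo)).1.getD 0 = bestP w cur R := by
          rw [hmain.1, hbP, runMin, List.foldl_map]
        refine ⟨hval, ?_⟩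
        exact insert_sound hmain.2 hnd hval

theorem bestB_spec (w : PySem.Dict (String × String) Int) (rest : List String) (hnd : rest.Nodup)
    (cur : String) (memo : PySem.Dict (String × List String) Int) (hS : SoundM w memo) :
    (bestB w cur rest memo).1 = bestP w cur rest ∧ SoundM w (bestB w cur rest memo).2 :=
  bestB_spec_aux w rest.length rest le_rfl hnd cur memo hS

-- ---- B's top level is the minimal Hamiltonian path cost ----

theorem top_isMin (w : PySem.Dict (String × String) Int) (S : List String) (hnd : S.Nodup)
    (hne : S ≠ []) :
    IsMinOf ((runMin (S.attach.map (fun c => bestP w c.1 (PySem.Set.discard S c.1)))).getD 0)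
      ((PySem.List.permutations S S.length).map (adjSum (Wd w))) := by
  obtain ⟨v, V, hV⟩ := List.exists_cons_of_ne_nil
    (show (S.attach.map (fun c => bestP w c.1 (PySem.Set.discard S c.1))) ≠ [] by
      simpa using hne)
  rw [hV, runMin_cons, Option.getD_some]
  have hmin : IsMinOf (V.foldl min v)
      (S.attach.map (fun c => bestP w c.1 (PySem.Set.discard S c.1))) := by
    rw [hV]; exact runMin_isMin (runMin_cons v V)
  constructor
  · obtain ⟨c, -, hc⟩ := List.mem_map.mp hmin.1
    have hcS : c.1 ∈ S := c.2
    have hsub := bestP_isMin w (PySem.Set.discard S c.1) (PySem.Set.nodup_discard _ _ hnd) c.1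
    obtain ⟨q', hq'mem, hq'⟩ := List.mem_map.mp hsub.1
    have hq'p : q'.Perm (PySem.Set.discard S c.1) := mem_permutations_iff.mp hq'mem
    have hqS : (c.1 :: q').Perm S := (hq'p.cons c.1).trans (cons_discard_perm hnd hcS)
    refine List.mem_map.mpr ⟨c.1 :: q', mem_permutations_iff.mpr hqS, ?_⟩
    cases q' with
    | nil =>
      have h0 : bestP w c.1 (PySem.Set.discard S c.1) = 0 := by
        have hd0 : PySem.Set.discard S c.1 = [] := by
          have := hq'p.symm.length_eq
          simpa using List.length_eq_zero_iff.mp (by simpa using this)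
        rw [hd0, bestP]; rfl
      rw [← hc, h0]
      rfl
    | cons d q'' =>
      rw [← hc, ← hq']
  · intro x hx
    obtain ⟨q, hqmem, rfl⟩ := List.mem_map.mp hx
    have hq : q.Perm S := mem_permutations_iff.mp hqmem
    cases q with
    | nil =>
      exfalso
      exact hne (List.length_eq_zero_iff.mp (by simpa using hq.length_eq.symm))
    | cons c q' =>
      obtain ⟨hc, hq'⟩ := List.cons_perm_iff_perm_erase.mp hq
      have hq'd : q'.Perm (PySem.Set.discard S c) := hq'.trans (erase_perm_discard hnd c)
      have hsub := bestP_isMin w (PySem.Set.discard S c) (PySem.Set.nodup_discard _ _ hnd) c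
      have hb1 : bestP w c (PySem.Set.discard S c) ≤ adjSum (Wd w) (c :: q') :=
        hsub.2 _ (List.mem_map.mpr ⟨q', mem_permutations_iff.mpr hq'd, rfl⟩)
      have hb2 : V.foldl min v ≤ bestP w c (PySem.Set.discard S c) :=
        hmin.2 _ (List.mem_map.mpr ⟨⟨c, hc⟩, List.mem_attach _ _, rfl⟩)
      omega

theorem alt_isMin (data : List (String × String × Int)) :
    IsMinOf (part_one_alt data)
      ((PySem.List.permutations (PySem.Set.ofList (data.flatMap (fun t => [t.1, t.2.1])))
          (PySem.Set.ofList (data.flatMap (fun t => [t.1, t.2.1]))).length).map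
        (adjSum (Wd (data.foldl (fun w t => (PySem.Dict.insert w (t.1, t.2.1) t.2.2).insert (t.2.1, t.1) t.2.2) PySem.Dict.empty)))) := by
  set w := data.foldl (fun w t => (PySem.Dict.insert w (t.1, t.2.1) t.2.2).insert (t.2.1, t.1) t.2.2) PySem.Dict.empty with hw
  set S : PySem.Set String := PySem.Set.ofList (data.flatMap (fun t => [t.1, t.2.1])) with hS
  have hnd : S.Nodup := PySem.Set.nodup_ofList _
  by_cases hemp : S.isEmpty
  · have hSnil : S = [] := List.isEmpty_iff.mp hemp
    have h0 : part_one_alt data = 0 := by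
      rw [part_one_alt]
      rw [← hw, ← hS, if_pos hemp]
    rw [h0, hSnil]
    simp [IsMinOf, adjSum]
  · have hne : S ≠ [] := fun h => hemp (by simp [h])
    have hfold : ∀ (l : List {x // x ∈ S}) (acc : Option Int)
        (memo₀ : PySem.Dict (String × List String) Int), SoundM w memo₀ →
        (l.foldl
          (fun (p : Option Int × PySem.Dict (String × List String) Int) c =>
            let r := bestB w c.1 (PySem.Set.discard S c.1) p.2
            (match p.1 with
             | none => some r.1
             | some m => if r.1 < m then some r.1 else some m, r.2))
          (acc, memo₀)).1
          = l.foldl (fun a c => minStep a (bestP w c.1 (PySem.Set.discard S c.1))) acc := by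
      intro l
      induction l with
      | nil => intro acc memo₀ hS₀; rfl
      | cons c l ihl =>
        intro acc memo₀ hS₀
        have hrec := bestB_spec w (PySem.Set.discard S c.1) (PySem.Set.nodup_discard _ _ hnd)
          c.1 memo₀ hS₀
        simp only [List.foldl_cons]
        have hstep :
            ((match acc with
             | none => some ((bestB w c.1 (PySem.Set.discard S c.1) memo₀).1)
             | some m => if (bestB w c.1 (PySem.Set.discard S c.1) memo₀).1 < m
                 then some ((bestB w c.1 (PySem.Set.discard S c.1) memo₀).1)
                 else some m : Option Int),
             (bestB w c.1 (PySem.Set.discard S c.1) memo₀).2)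
            = (minStep acc (bestP w c.1 (PySem.Set.discard S c.1)),
               (bestB w c.1 (PySem.Set.discard S c.1) memo₀).2) := by
          rw [hrec.1]
          cases acc <;> rfl
        rw [hstep]
        exact ihl _ _ hrec.2
    have hS0 : SoundM w PySem.Dict.empty := by
      intro c s v hv
      rw [PySem.Dict.get?_empty] at hv
      cases hv
    have hval : part_one_alt data
        = (runMin (S.attach.map (fun c => bestP w c.1 (PySem.Set.discard S c.1)))).getD 0 := by
      rw [part_one_alt, ← hw, ← hS, if_neg hemp]
      rw [hfold S.attach none PySem.Dict.empty hS0]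
      rw [runMin, List.foldl_map]
    rw [hval]
    exact top_isMin w S hnd hne

-- ---- final assembly ----

theorem map_f_range (C : List String) :
    (PySem.List.pyRange 0 (C.length : Int) 1).map (fun i => C.getD i.toNat "") = C := by
  apply List.ext_getElem
  · simp [PySem.List.length_pyRange_one]
  · intro k h1 h2
    rw [List.getElem_map, PySem.List.getElem_pyRange_one]
    rw [List.getD_eq_getElem C "" (by simpa using h2)]
    congr 1
    omega

theorem map_g_C {C : List String} (hnd : C.Nodup) :
    C.map (fun a => (C.idxOf a : Int)) = PySem.List.pyRange 0 (C.length : Int) 1 := by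
  apply List.ext_getElem
  · simp [PySem.List.length_pyRange_one]
  · intro k h1 h2
    rw [List.getElem_map, PySem.List.getElem_pyRange_one]
    rw [List.Nodup.idxOf_getElem hnd k (by simpa using h1)]
    omega

theorem pyGetD_zeros {l : List Int} (hall : ∀ x ∈ l, x = (0 : Int)) (b : Int) :
    PySem.List.pyGetD l b 0 = 0 := by
  by_cases h : PySem.Raise.InRange l.length b
  · exact hall _ (PySem.List.pyGetD_mem l 0 h)
  · exact PySem.List.pyGetD_of_none l b 0 ((PySem.List.pyGet?_eq_none_iff l b).mpr h)

theorem mget_zero_of_zero_rows {n : Nat} (a b : Int) :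
    mget ((PySem.List.pyRange 0 (n : Int) 1).map (fun _ => PySem.List.pyRepeat [(0 : Int)] (n : Int))) a b = 0 := by
  rw [mget]
  apply pyGetD_zeros
  intro x hx
  by_cases h : PySem.Raise.InRange ((PySem.List.pyRange 0 (n : Int) 1).map (fun _ => PySem.List.pyRepeat [(0 : Int)] (n : Int))).length a
  · have hM := PySem.List.pyGetD_mem (i := a) ((PySem.List.pyRange 0 (n : Int) 1).map (fun _ => PySem.List.pyRepeat [(0 : Int)] (n : Int))) ([] : List Int) h
    obtain ⟨i, -, hrow⟩ := List.mem_map.mp hM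
    rw [← hrow] at hx
    rw [PySem.List.pyRepeat_singleton] at hx
    exact List.eq_of_mem_replicate hx
  · rw [PySem.List.pyGetD_of_none _ a ([] : List Int)
      ((PySem.List.pyGet?_eq_none_iff _ a).mpr h)] at hx
    cases hx

theorem part_one_eq_alt (data : List (String × String × Int)) :
    part_one data = part_one_alt data := by
  simp only [part_one]
  set allc := data.flatMap (fun t => [t.1, t.2.1]) with hallc
  set S : PySem.Set String := PySem.Set.ofList allc with hSdef
  set C := PySem.List.sorted S (fun c => c) false with hCdef
  have hndS : S.Nodup := PySem.Set.nodup_ofList _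
  have hCS : C.Perm S := sorted_id_perm S
  have hndC : C.Nodup := (hCS.nodup_iff).mpr hndS
  set cid := (PySem.List.enumerate C 0).foldl (fun d p => d.insert p.2 p.1) PySem.Dict.empty with hciddef
  have hcid : ∀ c ∈ C, cid.getD c 0 = (C.idxOf c : Int) := fun c hc => cid_getD hndC hc
  have hd : ∀ t ∈ data, t.1 ∈ C ∧ t.2.1 ∈ C := by
    intro t ht
    constructor <;>
    · rw [hCdef, PySem.List.mem_sorted, hSdef, PySem.Set.mem_ofList, hallc]
      exact List.mem_flatMap.mpr ⟨t, ht, by simp⟩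
  set w := data.foldl (fun w t => (PySem.Dict.insert w (t.1, t.2.1) t.2.2).insert (t.2.1, t.1) t.2.2) PySem.Dict.empty with hwdef
  set M0 := (PySem.List.pyRange 0 (C.length : Int) 1).map (fun _ => PySem.List.pyRepeat [(0 : Int)] (C.length : Int)) with hM0def
  have hM0len : M0.length = C.length := by simp [hM0def, PySem.List.length_pyRange_one]
  have hM0rows : ∀ r ∈ M0, r.length = C.length := by
    intro r hr
    obtain ⟨i, -, rfl⟩ := List.mem_map.mp hr
    rw [PySem.List.pyRepeat_singleton]
    simp
  have hM0get : ∀ a ∈ C, ∀ b ∈ C, mget M0 (C.idxOf a) (C.idxOf b) = Wd PySem.Dict.empty a b := by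
    intro a _ b _
    rw [hM0def, mget_zero_of_zero_rows, Wd, PySem.Dict.getD_empty]
  obtain ⟨hMlen, hMrows, hMget⟩ :=
    matrix_dict_inv C cid hcid data hd M0 PySem.Dict.empty hM0len hM0rows hM0get
  set M := data.foldl (fun M t =>
      let i := cid.getD t.1 0
      let j := cid.getD t.2.1 0
      let M1 := PySem.List.pySetD M i (PySem.List.pySetD (PySem.List.pyGetD M i []) j t.2.2)
      PySem.List.pySetD M1 j (PySem.List.pySetD (PySem.List.pyGetD M1 j []) i t.2.2)) M0 with hMdef
  rw [hMlen]
  set n := C.length with hn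
  set idxs := PySem.List.pyRange 0 (n : Int) 1 with hidxs
  set cost := fun (perm : List Int) => (PySem.List.pyRange 0 ((n : Int) - 1) 1).foldl
      (fun acc i => acc +
        PySem.List.pyGetD (PySem.List.pyGetD M (PySem.List.pyGetD perm i 0) []) (PySem.List.pyGetD perm (i + 1) 0) 0) 0 with hcost
  have hidxlen : idxs.length = n := by
    rw [hidxs, PySem.List.length_pyRange_one]; omega
  -- the A fold is runMin of the mapped costs
  have hA : ((PySem.List.permutations idxs idxs.length).foldl (fun md perm =>
      match md with
      | none => some (cost perm)
      | some m => if cost perm < m then some (cost perm) else some m) none)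
      = runMin ((PySem.List.permutations idxs idxs.length).map cost) := by
    rw [runMin, List.foldl_map]
    rfl
  rw [hA]
  -- nonempty
  have hmemidxs : idxs ∈ PySem.List.permutations idxs idxs.length := mem_permutations_iff.mpr (List.Perm.refl _)
  have hne : (PySem.List.permutations idxs idxs.length).map cost ≠ [] :=
    fun h => by simpa [h] using List.mem_map_of_mem (f := cost) hmemidxs
  obtain ⟨v, V, hV⟩ := List.exists_cons_of_ne_nil hne
  rw [hV, runMin_cons, Option.getD_some]
  have hmA : IsMinOf (V.foldl min v) ((PySem.List.permutations idxs idxs.length).map cost) := by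
    rw [hV]; exact runMin_isMin (runMin_cons v V)
  -- B side, transported to C
  have hB := alt_isMin data
  rw [← hallc, ← hSdef, ← hwdef] at hB
  have hBC : IsMinOf (part_one_alt data)
      ((PySem.List.permutations C C.length).map (adjSum (Wd w))) :=
    IsMinOf_of_mem_iff (perms_map_mem_iff hCS.symm _) hB
  -- the two value lists have the same members
  have hbridge : ∀ (i j : Int), 0 ≤ i → i < (n : Int) → 0 ≤ j → j < (n : Int) →
      mget M i j = Wd w (C.getD i.toNat "") (C.getD j.toNat "") := by
    intro i j hi hi' hj hj'
    have hiN : i.toNat < C.length := by omega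
    have hjN : j.toNat < C.length := by omega
    have hfi : C.getD i.toNat "" = C[i.toNat] := List.getD_eq_getElem C "" hiN
    have hfj : C.getD j.toNat "" = C[j.toNat] := List.getD_eq_getElem C "" hjN
    have h1 := hMget C[i.toNat] (List.getElem_mem hiN) C[j.toNat] (List.getElem_mem hjN)
    rw [List.Nodup.idxOf_getElem hndC i.toNat hiN, List.Nodup.idxOf_getElem hndC j.toNat hjN] at h1
    rw [hfi, hfj, ← h1]
    congr 1 <;> omega
  have hiff : ∀ x, x ∈ (PySem.List.permutations idxs idxs.length).map cost ↔
      x ∈ (PySem.List.permutations C C.length).map (adjSum (Wd w)) := by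
    intro x
    constructor
    · rintro hx
      obtain ⟨p, hpmem, rfl⟩ := List.mem_map.mp hx
      have hp : p.Perm idxs := mem_permutations_iff.mp hpmem
      have hplen : p.length = n := hp.length_eq.trans hidxlen
      have hpmemrange : ∀ i ∈ p, 0 ≤ i ∧ i < (n : Int) := by
        intro i hi
        have : i ∈ idxs := hp.mem_iff.mp hi
        rw [hidxs] at this
        exact PySem.List.mem_pyRange_one.mp this
      have hcostp : cost p = adjSum (Wd w) (p.map (fun i => C.getD i.toNat "")) := by
        have h1 : cost p = adjSum (mget M) p := by
          rw [hcost]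
          have := ipath_eq_adjSum M p
          rw [hplen] at this
          exact this
        rw [h1, adjSum_map]
        exact adjSum_congr (fun i hi j hj => by
          obtain ⟨hi1, hi2⟩ := hpmemrange i hi
          obtain ⟨hj1, hj2⟩ := hpmemrange j hj
          exact hbridge i j hi1 hi2 hj1 hj2)
      refine List.mem_map.mpr ⟨p.map (fun i => C.getD i.toNat ""), ?_, hcostp.symm⟩
      apply mem_permutations_iff.mpr
      have := hp.map (fun i => C.getD i.toNat "")
      rwa [hidxs, map_f_range C] at this
    · rintro hx
      obtain ⟨q, hqmem, rfl⟩ := List.mem_map.mp hx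
      have hq : q.Perm C := mem_permutations_iff.mp hqmem
      have hqsub : ∀ a ∈ q, a ∈ C := fun a ha => hq.mem_iff.mp ha
      have hplen : (q.map (fun a => (C.idxOf a : Int))).length = n := by
        rw [List.length_map, hq.length_eq, hn]
      have hval : adjSum (Wd w) q = cost (q.map (fun a => (C.idxOf a : Int))) := by
        have h1 : adjSum (Wd w) q = adjSum (fun a b => mget M (C.idxOf a) (C.idxOf b)) q :=
          adjSum_congr (fun a ha b hb => (hMget a (hqsub a ha) b (hqsub b hb)).symm)
        have h2 : adjSum (fun a b => mget M (C.idxOf a) (C.idxOf b)) q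
            = adjSum (mget M) (q.map (fun a => (C.idxOf a : Int))) := (adjSum_map _ _ q).symm
        have h3 : cost (q.map (fun a => (C.idxOf a : Int))) = adjSum (mget M) (q.map (fun a => (C.idxOf a : Int))) := by
          rw [hcost]
          have := ipath_eq_adjSum M (q.map (fun a => (C.idxOf a : Int)))
          rw [hplen] at this
          exact this
        rw [h1, h2, ← h3]
      refine List.mem_map.mpr ⟨q.map (fun a => (C.idxOf a : Int)), ?_, hval.symm⟩
      apply mem_permutations_iff.mpr
      have := hq.map (fun a => (C.idxOf a : Int))
      rwa [map_g_C hndC, ← hidxs] at this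
  exact IsMinOf_unique hmA (IsMinOf_of_mem_iff (fun x => (hiff x).symm) hBC)

-- ===== VERDICT (by name: the statement is the Claim_ definition above) =====
theorem part_one_spec : Claim_equal_part_one := by
  intro data _
  unfold Spec_part_one
  exact part_one_eq_alt data
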